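-- pv_equiv track=rewrite | github.com/casualWaist/pythonScripts | lookUpVox.py | jobFinType
-- ===== SOURCE A (Python) =====
-- def jobFinType(job):
--     type = 'TBD'
--     if 'lineItems' in job:
--         for item in job['lineItems']:
--             if item['name'] == 'Shipping':
--                 type = 'Shipping'
--             elif item['name'] == 'Pick-Up':
--                 type = 'Pick-Up'
--             elif item['name'] == 'Installation':
--                 type = 'Installation'
--             elif item['name'] == 'Delivery':
--                 type = 'Delivery'
--     return type
-- ===== SOURCE B (Python) =====
-- # Simpler: early-returning reverse scan with a set membership test (last recognised name wins).
-- _JOB_TYPES = {'Shipping', 'Pick-Up', 'Installation', 'Delivery'}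
--
-- def jobFinType(job):
--     for item in reversed(job.get('lineItems', [])):
--         if item['name'] in _JOB_TYPES:
--             return item['name']
--     return 'TBD'
-- ===== Notes on version B (the rewrite author's own statement) =====
-- stated objective: simpler
-- what changed: Replaces the forward last-wins accumulator over four elif branches by a reverse scan that returns the first item whose name is in a set of recognised names, else 'TBD'.
import Mathlib
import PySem

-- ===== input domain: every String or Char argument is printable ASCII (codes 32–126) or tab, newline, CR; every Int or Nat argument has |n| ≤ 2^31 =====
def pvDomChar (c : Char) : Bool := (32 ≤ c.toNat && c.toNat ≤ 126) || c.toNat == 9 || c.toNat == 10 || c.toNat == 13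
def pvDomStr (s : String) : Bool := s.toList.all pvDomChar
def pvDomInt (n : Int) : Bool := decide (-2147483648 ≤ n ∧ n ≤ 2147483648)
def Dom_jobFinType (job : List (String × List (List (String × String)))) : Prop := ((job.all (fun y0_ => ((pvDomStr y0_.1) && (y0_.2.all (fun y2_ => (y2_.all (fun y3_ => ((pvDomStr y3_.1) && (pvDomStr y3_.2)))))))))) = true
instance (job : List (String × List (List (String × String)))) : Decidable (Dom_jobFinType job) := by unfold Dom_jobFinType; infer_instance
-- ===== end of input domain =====

-- B replaces A's forward last-wins accumulator loop by an early-returning reverse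
-- scan with a single set-membership test (objective: simpler).

-- dict lookup on an association list: first matching key (Python dict semantics)
def pyDictGet? {α : Type} (d : List (String × α)) (k : String) : Option α :=
  match d with
  | [] => none
  | (k', v) :: rest => if k' = k then some v else pyDictGet? rest k

-- ===== PORT A =====
def jobFinType (job : List (String × List (List (String × String)))) : String :=
  -- type = 'TBD'; if 'lineItems' in job: for item in job['lineItems']: elif chain
  match pyDictGet? job "lineItems" with
  | none => "TBD"
  | some items =>
    items.foldl (fun t item =>
      -- item['name']: key present under Pre_jobFinType, so getD "" is exact there
      let n := (pyDictGet? item "name").getD ""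
      if n = "Shipping" then "Shipping"
      else if n = "Pick-Up" then "Pick-Up"
      else if n = "Installation" then "Installation"
      else if n = "Delivery" then "Delivery"
      else t) "TBD"

-- ===== PORT B =====
def jobTypeNames : PySem.Set String :=
  PySem.Set.ofList ["Shipping", "Pick-Up", "Installation", "Delivery"]

def jobFinType_alt (job : List (String × List (List (String × String)))) : String :=
  -- for item in reversed(job.get('lineItems', [])): if item['name'] in NAMES: return item['name']
  let items := (pyDictGet? job "lineItems").getD []
  match items.reverse.find? (fun item =>
      PySem.Set.contains jobTypeNames ((pyDictGet? item "name").getD "")) with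
  | some item => (pyDictGet? item "name").getD ""
  | none => "TBD"

-- ===== PRECONDITION & SPEC =====
-- Pre_ excludes exactly the inputs where some line item lacks the 'name' key:
-- there both Pythons raise KeyError.
def Pre_jobFinType (job : List (String × List (List (String × String)))) : Prop :=
  (((List.lookup "lineItems" job).getD []).all
    (fun item => (item.map Prod.fst).contains "name")) = true
instance (job : List (String × List (List (String × String)))) : Decidable (Pre_jobFinType job) := by unfold Pre_jobFinType; infer_instance

def pvWitness_jobFinType : (List (String × List (List (String × String)))) :=
  [("lineItems", [[("name", "Shipping")], [("name", "Other")]])]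

def Spec_jobFinType (job : List (String × List (List (String × String)))) (out : String) : Prop := out = jobFinType_alt job
instance (job : List (String × List (List (String × String)))) (out : String) : Decidable (Spec_jobFinType job out) := by unfold Spec_jobFinType; infer_instance

-- ===== CLAIM (what is proved, stated in full; the proofs are below) =====
def Claim_equal_jobFinType : Prop := ∀ (job : List (String × List (List (String × String)))), Dom_jobFinType job → Pre_jobFinType job → Spec_jobFinType job (jobFinType job)

-- ===== LEMMAS AND PROOFS =====

-- A's elif chain, on a name n, is "n if n is recognised, else keep the accumulator".
theorem step_core (t n : String) :
    (if n = "Shipping" then "Shipping"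
     else if n = "Pick-Up" then "Pick-Up"
     else if n = "Installation" then "Installation"
     else if n = "Delivery" then "Delivery"
     else t)
    = if PySem.Set.contains jobTypeNames n then n else t := by
  by_cases h1 : n = "Shipping" <;> by_cases h2 : n = "Pick-Up" <;>
    by_cases h3 : n = "Installation" <;> by_cases h4 : n = "Delivery" <;>
    simp_all [jobTypeNames, PySem.Set.contains, PySem.Set.ofList, PySem.Set.add]

-- A's forward last-wins fold equals B's first-match on the reversed list.
theorem fold_eq_rev_find (items : List (List (String × String))) (t : String) :
    items.foldl (fun t item =>
      let n := (pyDictGet? item "name").getD ""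
      if n = "Shipping" then "Shipping"
      else if n = "Pick-Up" then "Pick-Up"
      else if n = "Installation" then "Installation"
      else if n = "Delivery" then "Delivery"
      else t) t
    = match items.reverse.find? (fun item =>
        PySem.Set.contains jobTypeNames ((pyDictGet? item "name").getD "")) with
      | some item => (pyDictGet? item "name").getD ""
      | none => t := by
  induction items generalizing t with
  | nil => rfl
  | cons x xs ih =>
    simp only [List.foldl_cons, List.reverse_cons, List.find?_append]
    rw [ih]
    cases hf : xs.reverse.find? (fun item =>
        PySem.Set.contains jobTypeNames ((pyDictGet? item "name").getD "")) with
    | some it => simp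
    | none =>
      simp only [Option.none_or, List.find?_cons, List.find?_nil]
      rw [step_core]
      by_cases hp : (pyDictGet? x "name").getD "" ∈ jobTypeNames <;>
        simp [hp]

-- ===== VERDICT (by name: the statement is the Claim_ definition above) =====
theorem jobFinType_spec : Claim_equal_jobFinType := by
  intro job _ _
  unfold Spec_jobFinType jobFinType jobFinType_alt
  cases h : pyDictGet? job "lineItems" with
  | none => rfl
  | some items => simpa [h] using fold_eq_rev_find items "TBD"
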